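-- pv_equiv track=rewrite | github.com/YijieYao-YYJ/dialogue | MultiWOZ_2.1/split_multiwoz21.py | even_sequential_slices
-- ===== SOURCE A (Python) =====
-- def even_sequential_slices(n_items: int, n_files: int):
--     """按顺序把 n_items 平均切为 n_files 份"""
--     if n_items <= 0:
--         return []
--     n_files = max(1, min(n_files, n_items))
--     base = n_items // n_files
--     rem = n_items % n_files
--     slices = []
--     start = 0
--     for i in range(n_files):
--         size = base + (1 if i < rem else 0)
--         end = start + size
--         slices.append((start, end))
--         start = end
--     return slices
-- ===== SOURCE B (Python) =====
-- def even_sequential_slices(n_items: int, n_files: int):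
--     """按顺序把 n_items 平均切为 n_files 份"""
--     if n_items <= 0:
--         return []
--     n_files = max(1, min(n_files, n_items))
--     base, rem = divmod(n_items, n_files)
--     return [(i * base + min(i, rem), (i + 1) * base + min(i + 1, rem))
--             for i in range(n_files)]
-- ===== Notes on version B (the rewrite author's own statement) =====
-- stated objective: simpler
-- what changed: Replaced the loop-carried running start accumulator with a closed-form boundary formula per index (start = i*base + min(i, rem)) emitted by a single list comprehension.
import Mathlib
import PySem

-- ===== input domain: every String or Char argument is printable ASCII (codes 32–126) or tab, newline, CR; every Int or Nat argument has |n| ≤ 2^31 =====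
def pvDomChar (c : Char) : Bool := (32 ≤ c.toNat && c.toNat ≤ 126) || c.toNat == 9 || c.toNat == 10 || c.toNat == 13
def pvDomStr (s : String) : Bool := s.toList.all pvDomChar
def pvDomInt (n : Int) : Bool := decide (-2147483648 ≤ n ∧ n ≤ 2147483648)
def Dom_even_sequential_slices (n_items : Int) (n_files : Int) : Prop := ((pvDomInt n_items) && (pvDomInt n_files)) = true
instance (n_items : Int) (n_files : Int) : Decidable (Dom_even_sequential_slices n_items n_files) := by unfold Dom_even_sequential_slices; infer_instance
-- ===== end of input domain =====

-- B replaces A's loop-carried running `start` with a closed-form boundary formula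
-- per slice index, emitted by a list comprehension (objective: simpler).

-- ===== PORT A =====
def even_sequential_slices (n_items : Int) (n_files : Int) : List (Int × Int) :=
  if n_items ≤ 0 then []
  else
    let nf := max 1 (min n_files n_items)
    let base := PySem.Int.floordiv n_items nf
    let rem := PySem.Int.mod n_items nf
    let res := (PySem.List.pyRange 0 nf 1).foldl
      (fun (st : List (Int × Int) × Int) i =>
        let size := base + (if i < rem then 1 else 0)
        let e := st.2 + size
        (st.1 ++ [(st.2, e)], e)) ([], 0)
    res.1

-- ===== PORT B =====
def even_sequential_slices_alt (n_items : Int) (n_files : Int) : List (Int × Int) :=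
  if n_items ≤ 0 then []
  else
    let nf := max 1 (min n_files n_items)
    let base := PySem.Int.floordiv n_items nf
    let rem := PySem.Int.mod n_items nf
    (PySem.List.pyRange 0 nf 1).map
      (fun i => (i * base + min i rem, (i + 1) * base + min (i + 1) rem))

-- ===== PRECONDITION & SPEC =====
def Spec_even_sequential_slices (n_items : Int) (n_files : Int) (out : List (Int × Int)) : Prop := out = even_sequential_slices_alt n_items n_files
instance (n_items : Int) (n_files : Int) (out : List (Int × Int)) : Decidable (Spec_even_sequential_slices n_items n_files out) := by unfold Spec_even_sequential_slices; infer_instance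

-- ===== CLAIM (what is proved, stated in full; the proofs are below) =====
def Claim_equal_even_sequential_slices : Prop := ∀ (n_items : Int) (n_files : Int), Dom_even_sequential_slices n_items n_files → Spec_even_sequential_slices n_items n_files (even_sequential_slices n_items n_files)

-- ===== LEMMAS AND PROOFS =====

-- closed-form boundary of slice i
def pvBound (base rem i : Int) : Int := i * base + min i rem

theorem pvBound_succ (base rem i : Int) :
    pvBound base rem (i + 1) = pvBound base rem i + (base + (if i < rem then 1 else 0)) := by
  unfold pvBound
  split_ifs with h <;> · simp only [min_def]; split_ifs <;> ring_nf <;> omega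

-- the loop of A, started at boundary (pvBound base rem a), produces exactly
-- the closed-form slices for indices a, a+1, …, a+n-1
theorem pv_loop (base rem : Int) (n : Nat) : ∀ (a : Int) (acc : List (Int × Int)),
    (PySem.List.pyRange a (a + n) 1).foldl
      (fun (st : List (Int × Int) × Int) i =>
        let size := base + (if i < rem then 1 else 0)
        let e := st.2 + size
        (st.1 ++ [(st.2, e)], e)) (acc, pvBound base rem a)
    = (acc ++ (PySem.List.pyRange a (a + n) 1).map
        (fun i => (pvBound base rem i, pvBound base rem (i + 1))),
       pvBound base rem (a + n)) := by
  induction n with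
  | zero =>
    intro a acc
    rw [PySem.List.pyRange_one_eq_nil (by omega)]
    simp
  | succ m ih =>
    intro a acc
    rw [PySem.List.pyRange_one_cons (by push_cast; omega)]
    simp only [List.foldl_cons, List.map_cons]
    have hstep := pvBound_succ base rem a
    have h1 : a + ((m : Int) + 1) = (a + 1) + m := by ring
    have h2 : (a + (((m : Nat) + 1 : Nat) : Int)) = (a + 1) + (m : Int) := by push_cast; ring
    rw [h2, ← hstep]
    have := ih (a + 1) (acc ++ [(pvBound base rem a, pvBound base rem (a + 1))])
    simp only [List.append_assoc, List.singleton_append] at this ⊢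
    exact this

-- ===== VERDICT (by name: the statement is the Claim_ definition above) =====
theorem even_sequential_slices_spec : Claim_equal_even_sequential_slices := by
  intro n_items n_files _
  unfold Spec_even_sequential_slices even_sequential_slices even_sequential_slices_alt
  by_cases h : n_items ≤ 0
  · simp [h]
  · simp only [if_neg h]
    set nf := max 1 (min n_files n_items) with hnf
    have hnfpos : 0 < nf := by simp [hnf]
    set base := PySem.Int.floordiv n_items nf with hbase
    set rem := PySem.Int.mod n_items nf with hrem
    have hremnn : 0 ≤ rem := by
      rw [hrem, PySem.Int.mod_eq_emod_of_pos hnfpos]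
      exact Int.emod_nonneg _ (by omega)
    have h0 : (0 : Int) = pvBound base rem 0 := by
      unfold pvBound; simp [min_def]; omega
    have hnfc : nf = (0 : Int) + (nf.toNat : Int) := by omega
    have key := pv_loop base rem nf.toNat 0 []
    rw [← hnfc, ← h0] at key
    refine Eq.trans (congrArg Prod.fst key) ?_
    simp only [List.nil_append]
    rfl
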